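-- pv_equiv track=rewrite | github.com/edoardo-conti/us-ordinal-classification | experiments_launcher.py | find_common_settings
-- ===== SOURCE A (Python) =====
-- def find_common_settings(experiments_list):
--     common_params = {}
--
--     # failsafe
--     if not experiments_list:
--         return common_params
--
--     # get settings from the first experiment to use as baseline
--     first_experiment = experiments_list[0]
--
--     # check the setting common to all experiments and save them
--     for key, value in first_experiment.items():
--         if all(exp.get(key) == value for exp in experiments_list):
--             common_params[key] = value
--
--     return common_params
-- ===== SOURCE B (Python) =====
-- def find_common_settings(experiments_list):
--     if not experiments_list:
--         return {}
--     # shrinking candidate set: start from the first experiment, prune per experiment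
--     candidate = dict(experiments_list[0])
--     for exp in experiments_list[1:]:
--         for key in list(candidate.keys()):
--             if exp.get(key) != candidate[key]:
--                 del candidate[key]
--     return candidate
-- ===== Notes on version B (the rewrite author's own statement) =====
-- stated objective: alternative
-- what changed: Instead of testing every key of the first experiment against all experiments (per-key inner scan), B folds over the remaining experiments maintaining a shrinking candidate dict, deleting keys that disagree; pruning makes later passes cheaper but the worst-case cost is the same.
import Mathlib
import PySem

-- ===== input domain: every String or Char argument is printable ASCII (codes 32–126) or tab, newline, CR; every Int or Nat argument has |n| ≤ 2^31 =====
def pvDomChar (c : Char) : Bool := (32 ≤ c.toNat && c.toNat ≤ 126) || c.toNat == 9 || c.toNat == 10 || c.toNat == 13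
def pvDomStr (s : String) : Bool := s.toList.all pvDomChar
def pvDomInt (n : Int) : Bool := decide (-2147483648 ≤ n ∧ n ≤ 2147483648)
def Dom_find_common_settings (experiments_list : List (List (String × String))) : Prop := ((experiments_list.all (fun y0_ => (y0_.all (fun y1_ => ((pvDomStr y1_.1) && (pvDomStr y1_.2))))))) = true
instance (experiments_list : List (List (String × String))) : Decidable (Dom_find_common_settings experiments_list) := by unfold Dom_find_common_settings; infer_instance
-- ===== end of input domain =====

-- B replaces A's per-key scan over all experiments by a fold over the remaining
-- experiments that maintains a shrinking candidate dict (alternative decomposition).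


-- ===== PORT A =====
def find_common_settings (experiments_list : List (List (String × String))) : List (String × String) :=
  match experiments_list with
  | [] => (PySem.Dict.empty : PySem.Dict String String).items
  | first :: _ =>
    let firstD : PySem.Dict String String := PySem.Dict.ofList first
    (firstD.items.foldl
      (fun (common : PySem.Dict String String) kv =>
        if experiments_list.all (fun exp => (PySem.Dict.ofList exp).get? kv.1 == some kv.2)
        then common.insert kv.1 kv.2 else common)
      PySem.Dict.empty).items

-- ===== PORT B =====
-- one iteration of B's inner loop: 'if exp.get(key) != candidate[key]: del candidate[key]'
-- (the 'none' branch is unreachable in the Python: key comes from the snapshot of candidate's keys)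
def pruneStep (exp : PySem.Dict String String) (c : PySem.Dict String String) (k : String) : PySem.Dict String String :=
  match c.get? k with
  | some v => if exp.get? k == some v then c else c.erase k
  | none => c

def find_common_settings_alt (experiments_list : List (List (String × String))) : List (String × String) :=
  match experiments_list with
  | [] => []
  | first :: rest =>
    ((rest.map (PySem.Dict.ofList : List (String × String) → PySem.Dict String String)).foldl
      (fun cand exp => cand.keys.foldl (pruneStep exp) cand)
      (PySem.Dict.ofList first)).items

-- ===== PRECONDITION & SPEC =====
def Spec_find_common_settings (experiments_list : List (List (String × String))) (out : List (String × String)) : Prop := out = find_common_settings_alt experiments_list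
instance (experiments_list : List (List (String × String))) (out : List (String × String)) : Decidable (Spec_find_common_settings experiments_list out) := by unfold Spec_find_common_settings; infer_instance

-- ===== CLAIM (what is proved, stated in full; the proofs are below) =====
def Claim_equal_find_common_settings : Prop := ∀ (experiments_list : List (List (String × String))), Dom_find_common_settings experiments_list → Spec_find_common_settings experiments_list (find_common_settings experiments_list)

-- ===== LEMMAS AND PROOFS =====

-- A's loop over fresh distinct keys from an accumulator is a filter-append
theorem foldl_insert_if_items (p : String × String → Bool) :
    ∀ (l : List (String × String)) (acc : PySem.Dict String String),
      (l.map Prod.fst).Nodup → (∀ kv ∈ l, acc.contains kv.1 = false) →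
      (l.foldl (fun c kv => if p kv then c.insert kv.1 kv.2 else c) acc).items
        = acc.items ++ l.filter p := by
  intro l
  induction l with
  | nil => intro acc _ _; simp
  | cons kv t ih =>
    intro acc hnd hfresh
    simp only [List.map_cons, List.nodup_cons] at hnd
    by_cases hp : p kv
    · have hfk : acc.contains kv.1 = false := hfresh kv (by simp)
      have hitems := PySem.Dict.items_insert_of_not_contains (d := acc) (k := kv.1) (v := kv.2) hfk
      have hfresh' : ∀ kv' ∈ t, (acc.insert kv.1 kv.2).contains kv'.1 = false := by
        intro kv' hmem
        rw [PySem.Dict.contains_insert]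
        have hne : kv'.1 ≠ kv.1 := by
          intro h; exact hnd.1 (h ▸ List.mem_map_of_mem hmem)
        simp [hne, hfresh kv' (List.mem_cons_of_mem _ hmem)]
      simp only [List.foldl_cons, hp, if_pos rfl, if_true]
      rw [ih _ hnd.2 hfresh', hitems]
      simp [List.filter_cons, hp]
    · simp only [List.foldl_cons, hp, if_false, Bool.false_eq_true]
      rw [ih _ hnd.2 (fun kv' h => hfresh kv' (List.mem_cons_of_mem _ h))]
      simp [List.filter_cons, hp]

theorem erase_keys_nodup (c : PySem.Dict String String) (k : String) (h : c.keys.Nodup) :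
    (c.erase k).keys.Nodup := by
  have : (c.erase k).keys.Sublist c.keys := by
    simp only [PySem.Dict.keys, PySem.Dict.erase]
    exact List.Sublist.map Prod.fst List.filter_sublist
  exact h.sublist this

-- B's inner loop over a nodup key snapshot filters the items by agreement with exp
theorem prune_items (exp : PySem.Dict String String) :
    ∀ (ks : List String) (c : PySem.Dict String String), ks.Nodup → c.keys.Nodup →
      (ks.foldl (pruneStep exp) c).items
        = c.items.filter (fun kv => !(ks.contains kv.1) || exp.get? kv.1 == some kv.2) := by
  intro ks
  induction ks with
  | nil => intro c _ _; simp
  | cons k t ih =>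
    intro c hnd hcnd
    simp only [List.nodup_cons] at hnd
    simp only [List.foldl_cons]
    have hstep : pruneStep exp c k = pruneStep exp c k := rfl
    cases hg : c.get? k with
    | none =>
      have hnk : k ∉ c.keys := (PySem.Dict.get?_eq_none_iff_not_mem_keys c k).mp hg
      simp only [pruneStep, hg]
      rw [ih c hnd.2 hcnd]
      apply List.filter_congr
      intro kv hmem
      have : kv.1 ≠ k := fun h => hnk (h ▸ PySem.Dict.mem_keys_of_mem_items c hmem)
      simp [this]
    | some v =>
      by_cases hmatch : exp.get? k = some v
      · simp only [pruneStep, hg, hmatch, beq_self_eq_true, if_true]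
        rw [ih c hnd.2 hcnd]
        apply List.filter_congr
        intro kv hmem
        by_cases hk : kv.1 = k
        · have hv : kv.2 = v := by
            have := PySem.Dict.get?_of_mem_items c hmem hcnd
            rw [hk, hg] at this; exact (Option.some.inj this).symm
          have hnotin : t.contains kv.1 = false := by
            simp only [hk]
            exact by simpa using hnd.1
          simp [List.contains_cons, hk, hnotin, hv, hmatch]
        · simp [List.contains_cons, hk]
      · have hbeq : (exp.get? k == some v) = false := by
          simp [hmatch]
        simp only [pruneStep, hg, hbeq, Bool.false_eq_true, if_false]
        rw [ih (c.erase k) hnd.2 (erase_keys_nodup c k hcnd)]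
        simp only [PySem.Dict.erase, List.filter_filter]
        apply List.filter_congr
        intro kv hmem
        by_cases hk : kv.1 = k
        · have hv : kv.2 = v := by
            have := PySem.Dict.get?_of_mem_items c hmem hcnd
            rw [hk, hg] at this; exact (Option.some.inj this).symm
          simp [List.contains_cons, hk, hv, hmatch]
        · simp [List.contains_cons, hk]

theorem keys_nodup_of_items_filter (c : PySem.Dict String String) (p : String × String → Bool)
    (d : PySem.Dict String String) (h : c.keys.Nodup) (hi : d.items = c.items.filter p) :
    d.keys.Nodup := by
  have : d.keys.Sublist c.keys := by
    simp only [PySem.Dict.keys, hi]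
    exact List.Sublist.map Prod.fst List.filter_sublist
  exact h.sublist this

-- B's outer fold filters the initial items by agreement with every experiment
theorem outer_fold_items :
    ∀ (es : List (PySem.Dict String String)) (c : PySem.Dict String String), c.keys.Nodup →
      (es.foldl (fun cand exp => cand.keys.foldl (pruneStep exp) cand) c).items
        = c.items.filter (fun kv => es.all (fun e => e.get? kv.1 == some kv.2)) := by
  intro es
  induction es with
  | nil => intro c _; simp
  | cons e t ih =>
    intro c hcnd
    simp only [List.foldl_cons]
    have hknd : c.keys.Nodup := hcnd
    have h1 : (c.keys.foldl (pruneStep e) c).items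
        = c.items.filter (fun kv => e.get? kv.1 == some kv.2) := by
      rw [prune_items e c.keys c hknd hcnd]
      apply List.filter_congr
      intro kv hmem
      have hm : kv.1 ∈ c.keys := PySem.Dict.mem_keys_of_mem_items c hmem
      simp [hm]
    have hnd1 := keys_nodup_of_items_filter c _ _ hcnd h1
    rw [ih _ hnd1, h1, List.filter_filter]
    apply List.filter_congr
    intro a _
    simp only [List.all_cons]
    rw [Bool.and_comm]

-- ===== VERDICT (by name: the statement is the Claim_ definition above) =====
theorem find_common_settings_spec : Claim_equal_find_common_settings := by
  intro experiments_list _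
  unfold Spec_find_common_settings
  match experiments_list with
  | [] => rfl
  | first :: rest =>
    simp only [find_common_settings, find_common_settings_alt]
    have hnd : (PySem.Dict.ofList (κ := String) (ν := String) first).keys.Nodup :=
      PySem.Dict.nodup_keys_ofList first
    have hnd' : ((PySem.Dict.ofList (κ := String) (ν := String) first).items.map Prod.fst).Nodup := hnd
    rw [foldl_insert_if_items _ _ PySem.Dict.empty hnd' (by intro kv _; simp),
        outer_fold_items (rest.map PySem.Dict.ofList) _ hnd]
    simp only [PySem.Dict.empty, List.nil_append, List.all_map]
    apply List.filter_congr
    intro kv hmem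
    have hfirst : (PySem.Dict.ofList (κ := String) (ν := String) first).get? kv.1 = some kv.2 :=
      PySem.Dict.get?_of_mem_items _ hmem hnd
    simp [List.all_cons, hfirst, Function.comp_def]
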